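-- pv_equiv track=rewrite | github.com/chuckclift/minesweeperSimulator | utils.py | get_adjacent_tiles
-- ===== SOURCE A (Python) =====
-- def get_adjacent_tiles(point_location, group_locations):
--     """
--          returns a set of points that are adjacent to the
--          point_location value based on the group_locations list.
--          The group locations set should be a set of tuples
--          of the same type as the first function arguement
--     """
--
--     if len(group_locations) == 0:
--         return {}
--
--     x, y = point_location
--     adjustments = {(-1, 1), (0, 1), (1, 1), (-1, 0), (1, 0), (-1, -1), (0, -1)
--                   ,(1, -1)}
--
--     adjacent_tiles = {(x + v, y + w) for v, w in adjustments}
--     return adjacent_tiles.intersection(group_locations)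
-- ===== SOURCE B (Python) =====
-- def get_adjacent_tiles(point_location, group_locations):
--     """Same result as A, computed arithmetically: walk the group with an
--     accumulator and keep each point whose offset (dx, dy) from point_location
--     satisfies the Chebyshev adjacency test max(|dx|,|dy|) <= 1 with
--     (dx, dy) != (0, 0) -- exact for integer coordinates; no offset set,
--     no generated neighbours, no intersection."""
--     if len(group_locations) == 0:
--         return {}
--     x, y = point_location
--     result = set()
--     for px, py in group_locations:
--         dx = px - x
--         dy = py - y
--         if (dx != 0 or dy != 0) and -1 <= dx <= 1 and -1 <= dy <= 1:
--             result.add((px, py))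
--     return result
-- ===== Notes on version B (the rewrite author's own statement) =====
-- stated objective: alternative
-- what changed: B drops the 8-offset set and the generate-then-intersect step entirely: it walks group_locations once with an accumulator and keeps each point by an arithmetic Chebyshev test on its integer offset (-1<=dx<=1, -1<=dy<=1, not both zero), which is exact for integer coordinates.
-- outside the precondition, e.g. on get_adjacent_tiles((0, 0), set()): A returns {}, B returns {}
import Mathlib
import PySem

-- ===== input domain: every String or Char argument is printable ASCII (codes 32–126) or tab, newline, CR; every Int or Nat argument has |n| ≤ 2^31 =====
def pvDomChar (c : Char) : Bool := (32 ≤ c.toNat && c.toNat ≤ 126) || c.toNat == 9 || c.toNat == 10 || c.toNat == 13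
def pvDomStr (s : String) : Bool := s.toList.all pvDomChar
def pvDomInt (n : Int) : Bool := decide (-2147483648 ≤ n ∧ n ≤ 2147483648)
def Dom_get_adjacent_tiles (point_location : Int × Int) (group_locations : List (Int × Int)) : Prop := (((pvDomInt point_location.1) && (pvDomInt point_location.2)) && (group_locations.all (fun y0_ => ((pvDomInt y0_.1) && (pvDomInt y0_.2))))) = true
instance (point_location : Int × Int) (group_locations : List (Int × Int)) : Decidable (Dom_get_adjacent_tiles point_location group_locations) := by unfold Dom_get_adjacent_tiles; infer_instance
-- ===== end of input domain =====

-- ===== PORT A =====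
-- B replaces A's generate-8-neighbours-then-intersect with an accumulator loop over the
-- group keeping each point by an arithmetic Chebyshev test on its integer offset
-- (alternative formulation; same result on integer coordinates).
-- Python set order (hash order) is not modelled by PySem: the intersection result is
-- exact as a set and is given here in group order (first occurrences).
def get_adjacent_tiles (point_location : Int × Int) (group_locations : List (Int × Int)) : List (Int × Int) :=
  if group_locations.length == 0 then []
  else
    let x := point_location.1
    let y := point_location.2
    let adjustments : PySem.Set (Int × Int) :=
      PySem.Set.ofList [(-1,1),(0,1),(1,1),(-1,0),(1,0),(-1,-1),(0,-1),(1,-1)]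
    let adjacent_tiles : PySem.Set (Int × Int) :=
      PySem.Set.ofList (adjustments.map (fun vw => (x + vw.1, y + vw.2)))
    -- adjacent_tiles.intersection(group_locations)
    PySem.Set.inter (PySem.Set.ofList group_locations) adjacent_tiles

-- ===== PORT B =====
-- the accumulator loop of Source B: for (px,py) in rest: if chebyshev-adjacent, result.add(...)
def pvAdjLoop (x y : Int) : List (Int × Int) → PySem.Set (Int × Int) → PySem.Set (Int × Int)
  | [], result => result
  | (px, py) :: rest, result =>
    let dx := px - x
    let dy := py - y
    if (dx ≠ 0 ∨ dy ≠ 0) ∧ -1 ≤ dx ∧ dx ≤ 1 ∧ -1 ≤ dy ∧ dy ≤ 1 then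
      pvAdjLoop x y rest (PySem.Set.add result (px, py))
    else
      pvAdjLoop x y rest result

def get_adjacent_tiles_alt (point_location : Int × Int) (group_locations : List (Int × Int)) : List (Int × Int) :=
  if group_locations.length == 0 then []
  else pvAdjLoop point_location.1 point_location.2 group_locations PySem.Set.empty

-- ===== PRECONDITION & SPEC =====
-- Pre_ excludes the empty group, on which A (and B) return the dict literal {} rather
-- than a set of points — a value outside the declared return type set[tuple[int,int]].
def Pre_get_adjacent_tiles (point_location : Int × Int) (group_locations : List (Int × Int)) : Prop := group_locations ≠ []
instance (point_location : Int × Int) (group_locations : List (Int × Int)) : Decidable (Pre_get_adjacent_tiles point_location group_locations) := by unfold Pre_get_adjacent_tiles; infer_instance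
def pvWitness_get_adjacent_tiles : (Int × Int) × (List (Int × Int)) := ((0, 0), [(1, 1), (5, 5)])
def Spec_get_adjacent_tiles (point_location : Int × Int) (group_locations : List (Int × Int)) (out : List (Int × Int)) : Prop := out = get_adjacent_tiles_alt point_location group_locations
instance (point_location : Int × Int) (group_locations : List (Int × Int)) (out : List (Int × Int)) : Decidable (Spec_get_adjacent_tiles point_location group_locations out) := by unfold Spec_get_adjacent_tiles; infer_instance

-- ===== CLAIM (what is proved, stated in full; the proofs are below) =====
def Claim_equal_get_adjacent_tiles : Prop := ∀ (point_location : Int × Int) (group_locations : List (Int × Int)), Dom_get_adjacent_tiles point_location group_locations → Pre_get_adjacent_tiles point_location group_locations → Spec_get_adjacent_tiles point_location group_locations (get_adjacent_tiles point_location group_locations)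

-- ===== LEMMAS AND PROOFS =====

-- List.filter commutes with building a set by repeated Set.add (dedup keeps first occurrences).
theorem filter_foldl_set_add {α : Type} [BEq α] [LawfulBEq α] (p : α → Bool) (xs s : List α) :
    (xs.foldl PySem.Set.add s).filter p = (xs.filter p).foldl PySem.Set.add (s.filter p) := by
  induction xs generalizing s with
  | nil => simp [List.foldl]
  | cons x t ih =>
    have hstep : (PySem.Set.add s x).filter p = if p x then PySem.Set.add (s.filter p) x else s.filter p := by
      by_cases hm : x ∈ s
      · by_cases hp : p x
        · have hmf : x ∈ s.filter p := List.mem_filter.mpr ⟨hm, hp⟩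
          simp [PySem.Set.add, hm, hp, hmf]
        · simp [PySem.Set.add, hm, hp]
      · by_cases hp : p x
        · have hmf : x ∉ s.filter p := fun h => hm (List.mem_filter.mp h).1
          simp [PySem.Set.add, hm, hp, hmf]
        · simp [PySem.Set.add, hm, hp]
    show ((t.foldl PySem.Set.add (PySem.Set.add s x)).filter p) = _
    rw [ih (PySem.Set.add s x), hstep]
    by_cases hp : p x <;> simp [hp]

-- a point is a generated neighbour of (x,y) iff its offset passes B's Chebyshev test
theorem mem_neighbors_iff_cheby (x y a b : Int) :
    ((a,b) ∈ ([(-1,1),(0,1),(1,1),(-1,0),(1,0),(-1,-1),(0,-1),(1,-1)] : List (Int×Int)).map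
      (fun vw => (x + vw.1, y + vw.2))) ↔
    ((a - x ≠ 0 ∨ b - y ≠ 0) ∧ -1 ≤ a - x ∧ a - x ≤ 1 ∧ -1 ≤ b - y ∧ b - y ≤ 1) := by
  simp [Prod.ext_iff]
  omega

theorem neighbors_nodup (x y : Int) :
    (([(-1,1),(0,1),(1,1),(-1,0),(1,0),(-1,-1),(0,-1),(1,-1)] : List (Int×Int)).map
      (fun vw => (x + vw.1, y + vw.2))).Nodup := by
  apply List.Nodup.map
  · intro a b h
    cases a; cases b
    simp [Prod.ext_iff] at h ⊢
    omega
  · decide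

-- B's accumulator loop is the fold of Set.add over the Chebyshev-filtered list
theorem pvAdjLoop_eq_foldl_filter (x y : Int) (xs : List (Int × Int)) (acc : PySem.Set (Int × Int)) :
    pvAdjLoop x y xs acc =
      (xs.filter (fun p => decide ((p.1 - x ≠ 0 ∨ p.2 - y ≠ 0) ∧ -1 ≤ p.1 - x ∧ p.1 - x ≤ 1 ∧ -1 ≤ p.2 - y ∧ p.2 - y ≤ 1))).foldl
        PySem.Set.add acc := by
  induction xs generalizing acc with
  | nil => rfl
  | cons p t ih =>
    obtain ⟨a, b⟩ := p
    simp only [List.filter_cons]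
    by_cases h : (a - x ≠ 0 ∨ b - y ≠ 0) ∧ -1 ≤ a - x ∧ a - x ≤ 1 ∧ -1 ≤ b - y ∧ b - y ≤ 1
    · rw [show pvAdjLoop x y ((a, b) :: t) acc = pvAdjLoop x y t (PySem.Set.add acc (a, b)) from by
        simp only [pvAdjLoop]; rw [if_pos h]]
      rw [if_pos (decide_eq_true h), List.foldl_cons, ih]
    · rw [show pvAdjLoop x y ((a, b) :: t) acc = pvAdjLoop x y t acc from by
        simp only [pvAdjLoop]; rw [if_neg h]]
      rw [if_neg (by simpa using h), ih]

-- ===== VERDICT (by name: the statement is the Claim_ definition above) =====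
theorem get_adjacent_tiles_spec : Claim_equal_get_adjacent_tiles := by
  intro pl gl _ _
  obtain ⟨x, y⟩ := pl
  unfold Spec_get_adjacent_tiles get_adjacent_tiles get_adjacent_tiles_alt
  by_cases h : gl.length == 0
  · simp [h]
  · simp only [h]
    have hlit : PySem.Set.ofList ([(-1,1),(0,1),(1,1),(-1,0),(1,0),(-1,-1),(0,-1),(1,-1)] : List (Int×Int))
        = [(-1,1),(0,1),(1,1),(-1,0),(1,0),(-1,-1),(0,-1),(1,-1)] := by decide
    rw [hlit]
    rw [PySem.Set.ofList_eq_self_of_nodup _ (neighbors_nodup x y)]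
    show PySem.Set.inter (PySem.Set.ofList gl) _ = _
    unfold PySem.Set.inter
    have hcontains : ∀ p : Int × Int,
        PySem.Set.contains (([(-1,1),(0,1),(1,1),(-1,0),(1,0),(-1,-1),(0,-1),(1,-1)] : List (Int×Int)).map
          (fun vw => (x + vw.1, y + vw.2))) p
        = decide ((p.1 - x ≠ 0 ∨ p.2 - y ≠ 0) ∧ -1 ≤ p.1 - x ∧ p.1 - x ≤ 1 ∧ -1 ≤ p.2 - y ∧ p.2 - y ≤ 1) := by
      intro ⟨a, b⟩
      have hiff := mem_neighbors_iff_cheby x y a b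
      simp only [← List.contains_iff_mem] at hiff
      simp only [← hiff]
      simp
    simp only [hcontains, Bool.false_eq_true, if_false]
    show (PySem.Set.ofList gl).filter _ = pvAdjLoop x y gl PySem.Set.empty
    rw [pvAdjLoop_eq_foldl_filter]
    unfold PySem.Set.ofList
    rw [filter_foldl_set_add]
    rfl
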